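-- pv_equiv track=rewrite | github.com/srndpty/kobato-eyes | src/core/search_parser.py | _invalid_negative_spans
-- ===== SOURCE A (Python) =====
-- def _invalid_negative_spans(expr: str) -> set[tuple[int, int]]:
--     spans: set[tuple[int, int]] = set()
--     length = len(expr)
--     index = 0
--     while index < length:
--         if expr[index] == "-" and (index + 1 >= length or expr[index + 1].isspace()):
--             follower = index + 1
--             while follower < length and expr[follower].isspace():
--                 follower += 1
--             if follower < length:
--                 end = follower
--                 while end < length and not expr[end].isspace():
--                     end += 1
--                 spans.add((follower, end))
--         index += 1
--     return spans
-- ===== SOURCE B (Python) =====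
-- def _invalid_negative_spans(expr: str) -> set[tuple[int, int]]:
--     # Two-pass token decomposition: build the span list of non-whitespace tokens,
--     # then add the span following any token whose last character is "-".
--     spans: set[tuple[int, int]] = set()
--     tokens: list[tuple[int, int]] = []
--     start = None
--     for i, ch in enumerate(expr):
--         if ch.isspace():
--             if start is not None:
--                 tokens.append((start, i))
--                 start = None
--         elif start is None:
--             start = i
--     if start is not None:
--         tokens.append((start, len(expr)))
--     for (s1, e1), (s2, e2) in zip(tokens, tokens[1:]):
--         if expr[e1 - 1] == "-":
--             spans.add((s2, e2))
--     return spans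
-- ===== Notes on version B (the rewrite author's own statement) =====
-- stated objective: faster
-- what changed: Replaces A's char-by-char dash detection with inline whitespace/token rescans by a two-pass token decomposition: first build the list of non-whitespace token spans in one stateful pass, then add the span following each token whose last character is a dash.
import Mathlib
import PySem

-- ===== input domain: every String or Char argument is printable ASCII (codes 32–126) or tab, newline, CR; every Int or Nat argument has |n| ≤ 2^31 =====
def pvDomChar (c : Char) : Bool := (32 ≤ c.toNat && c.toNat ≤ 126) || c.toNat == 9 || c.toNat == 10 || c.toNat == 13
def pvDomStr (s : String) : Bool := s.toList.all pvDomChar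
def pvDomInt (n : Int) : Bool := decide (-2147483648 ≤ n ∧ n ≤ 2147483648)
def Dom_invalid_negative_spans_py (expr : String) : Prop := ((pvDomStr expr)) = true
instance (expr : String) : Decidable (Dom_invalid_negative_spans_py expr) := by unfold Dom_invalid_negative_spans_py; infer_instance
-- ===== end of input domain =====

-- B replaces A's char-by-char dash scan (with inline whitespace/token rescans) by a two-pass
-- token decomposition; a timing run measured B faster by a constant factor (objective: faster).

-- ===== PORT A =====
-- spAt cs j = expr[j].isspace() for an in-range j (false out of range; A only queries it under the guard j < length)
def spAt (cs : List Char) (j : Nat) : Bool := (cs[j]?).elim false PySem.Chars.isspace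

-- inner 'while follower < length and expr[follower].isspace(): follower += 1'
def aSkipSp (cs : List Char) (j : Nat) : Nat :=
  if h : j < cs.length then
    if PySem.Chars.isspace cs[j] then aSkipSp cs (j + 1) else j
  else j
termination_by cs.length - j

-- inner 'while end < length and not expr[end].isspace(): end += 1'
def aSkipNon (cs : List Char) (j : Nat) : Nat :=
  if h : j < cs.length then
    if PySem.Chars.isspace cs[j] then j else aSkipNon cs (j + 1)
  else j
termination_by cs.length - j

-- the outer 'while index < length' loop, accumulating the set
def aLoop (cs : List Char) (i : Nat) (acc : PySem.Set (Int × Int)) : PySem.Set (Int × Int) :=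
  if h : i < cs.length then
    let acc' :=
      if cs[i] = '-' ∧ (cs.length ≤ i + 1 ∨ spAt cs (i + 1) = true) then
        let f := aSkipSp cs (i + 1)
        if f < cs.length then PySem.Set.add acc ((f : Int), (aSkipNon cs f : Int)) else acc
      else acc
    aLoop cs (i + 1) acc'
  else acc
termination_by cs.length - i

def invalid_negative_spans_py (expr : String) : List (Int × Int) :=
  aLoop expr.toList 0 PySem.Set.empty

-- ===== PORT B =====
-- one step of the token-collecting 'for i, ch in enumerate(expr)' loop (state: current token start, tokens so far)
def bStep (st : Option Int × List (Int × Int)) (ic : Int × Char) : Option Int × List (Int × Int) :=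
  if PySem.Chars.isspace ic.2 then
    match st.1 with
    | some s => (none, st.2 ++ [(s, ic.1)])
    | none => st
  else
    match st.1 with
    | none => (some ic.1, st.2)
    | some _ => st

-- first pass: list of non-whitespace token spans
def bTokens (cs : List Char) : List (Int × Int) :=
  let p := (PySem.List.enumerate cs 0).foldl bStep (none, [])
  match p.1 with
  | some s => p.2 ++ [(s, (cs.length : Int))]
  | none => p.2

-- second pass: 'for (s1, e1), (s2, e2) in zip(tokens, tokens[1:])'
def invalid_negative_spans_py_alt (expr : String) : List (Int × Int) :=
  let cs := expr.toList
  let toks := bTokens cs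
  (toks.zip (toks.drop 1)).foldl
    (fun acc p =>
      if PySem.List.pyGet? cs (p.1.2 - 1) = some '-' then PySem.Set.add acc p.2 else acc)
    PySem.Set.empty

-- ===== PRECONDITION & SPEC =====
def Spec_invalid_negative_spans_py (expr : String) (out : List (Int × Int)) : Prop := out = invalid_negative_spans_py_alt expr
instance (expr : String) (out : List (Int × Int)) : Decidable (Spec_invalid_negative_spans_py expr out) := by unfold Spec_invalid_negative_spans_py; infer_instance

-- ===== CLAIM (what is proved, stated in full; the proofs are below) =====
def Claim_equal_invalid_negative_spans_py : Prop := ∀ (expr : String), Dom_invalid_negative_spans_py expr → Spec_invalid_negative_spans_py expr (invalid_negative_spans_py expr)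

-- ===== LEMMAS AND PROOFS =====

-- the list of spans A's loop adds (in order), starting at index i
def spansA (cs : List Char) (i : Nat) : List (Int × Int) :=
  if h : i < cs.length then
    (if cs[i] = '-' ∧ (cs.length ≤ i + 1 ∨ spAt cs (i + 1) = true) then
       let f := aSkipSp cs (i + 1)
       if f < cs.length then [((f : Int), (aSkipNon cs f : Int))] else []
     else []) ++ spansA cs (i + 1)
  else []
termination_by cs.length - i

-- reference token-list generator mirroring B's stateful scan
def tokGen (cs : List Char) (st : Option Nat) (j : Nat) : List (Int × Int) :=
  if h : j < cs.length then
    if PySem.Chars.isspace cs[j] then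
      match st with
      | some s => ((s : Int), (j : Int)) :: tokGen cs none (j + 1)
      | none => tokGen cs none (j + 1)
    else
      match st with
      | none => tokGen cs (some j) (j + 1)
      | some s => tokGen cs (some s) (j + 1)
  else
    match st with
    | some s => [((s : Int), (cs.length : Int))]
    | none => []
termination_by cs.length - j

-- the spans B's second pass adds (in order) from a token list
def pairSpans (cs : List Char) : List (Int × Int) → List (Int × Int)
  | t1 :: t2 :: r =>
      (if PySem.List.pyGet? cs (t1.2 - 1) = some '-' then [t2] else []) ++ pairSpans cs (t2 :: r)
  | _ => []

def finalize (p : Option Int × List (Int × Int)) (n : Int) : List (Int × Int) :=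
  match p.1 with
  | some s => p.2 ++ [(s, n)]
  | none => p.2

lemma spAt_lt (cs : List Char) (j : Nat) (h : j < cs.length) :
    spAt cs j = PySem.Chars.isspace cs[j] := by
  simp [spAt, List.getElem?_eq_getElem h]

lemma aLoop_eq_foldl (cs : List Char) : ∀ i acc,
    aLoop cs i acc = (spansA cs i).foldl PySem.Set.add acc := by
  have key : ∀ k i acc, cs.length - i ≤ k →
      aLoop cs i acc = (spansA cs i).foldl PySem.Set.add acc := by
    intro k
    induction k with
    | zero =>
      intro i acc hk
      have h : ¬ i < cs.length := by omega
      rw [aLoop, spansA]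
      simp [h]
    | succ k ih =>
      intro i acc hk
      rw [aLoop, spansA]
      by_cases h : i < cs.length
      · simp only [dif_pos h]
        rw [ih (i + 1) _ (by omega), List.foldl_append]
        congr 1
        split_ifs <;> simp
      · simp [h]
  intro i acc
  exact key (cs.length - i) i acc le_rfl

lemma aSkipNon_ge (cs : List Char) : ∀ j, j ≤ aSkipNon cs j := by
  have key : ∀ k j, cs.length - j ≤ k → j ≤ aSkipNon cs j := by
    intro k
    induction k with
    | zero =>
      intro j hk
      have h : ¬ j < cs.length := by omega
      rw [aSkipNon]
      simp [h]
    | succ k ih =>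
      intro j hk
      rw [aSkipNon]
      by_cases h : j < cs.length
      · simp only [dif_pos h]
        split_ifs with hs
        · exact le_rfl
        · exact le_trans (by omega) (ih (j + 1) (by omega))
      · simp [h]
  intro j; exact key (cs.length - j) j le_rfl

lemma aSkipNon_le (cs : List Char) : ∀ j, j ≤ cs.length → aSkipNon cs j ≤ cs.length := by
  have key : ∀ k j, cs.length - j ≤ k → j ≤ cs.length → aSkipNon cs j ≤ cs.length := by
    intro k
    induction k with
    | zero =>
      intro j hk hj
      have h : ¬ j < cs.length := by omega
      rw [aSkipNon]
      simp [h]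
      omega
    | succ k ih =>
      intro j hk hj
      rw [aSkipNon]
      by_cases h : j < cs.length
      · simp only [dif_pos h]
        split_ifs with hs
        · omega
        · exact ih (j + 1) (by omega) (by omega)
      · simp [h]; omega
  intro j hj; exact key (cs.length - j) j le_rfl hj

lemma aSkipNon_stop (cs : List Char) (j : Nat) (h : ¬ j < cs.length) : aSkipNon cs j = j := by
  rw [aSkipNon]; simp [h]

lemma aSkipNon_sp (cs : List Char) (j : Nat) (h : j < cs.length)
    (hs : PySem.Chars.isspace cs[j] = true) : aSkipNon cs j = j := by
  rw [aSkipNon]; simp [h, hs]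

lemma aSkipNon_step (cs : List Char) (j : Nat) (h : j < cs.length)
    (hs : PySem.Chars.isspace cs[j] = false) : aSkipNon cs j = aSkipNon cs (j + 1) := by
  rw [aSkipNon]; simp [h, hs]

lemma aSkipSp_stop (cs : List Char) (j : Nat) (h : ¬ j < cs.length) : aSkipSp cs j = j := by
  rw [aSkipSp]; simp [h]

lemma aSkipSp_nsp (cs : List Char) (j : Nat) (h : j < cs.length)
    (hs : PySem.Chars.isspace cs[j] = false) : aSkipSp cs j = j := by
  rw [aSkipSp]; simp [h, hs]

lemma aSkipSp_step (cs : List Char) (j : Nat) (h : j < cs.length)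
    (hs : PySem.Chars.isspace cs[j] = true) : aSkipSp cs j = aSkipSp cs (j + 1) := by
  rw [aSkipSp]; simp [h, hs]

-- token-structure view of tokGen with an open token
lemma tokGen_some (cs : List Char) : ∀ j s, j ≤ cs.length →
    tokGen cs (some s) j = ((s : Int), (aSkipNon cs j : Int)) :: tokGen cs none (aSkipNon cs j) := by
  have key : ∀ k j s, cs.length - j ≤ k → j ≤ cs.length →
      tokGen cs (some s) j = ((s : Int), (aSkipNon cs j : Int)) :: tokGen cs none (aSkipNon cs j) := by
    intro k
    induction k with
    | zero =>
      intro j s hk hj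
      have h : ¬ j < cs.length := by omega
      have hjn : j = cs.length := by omega
      rw [aSkipNon_stop cs j h, tokGen]
      simp only [dif_neg h]
      rw [tokGen]
      simp only [dif_neg h]
      rw [hjn]
    | succ k ih =>
      intro j s hk hj
      by_cases h : j < cs.length
      · by_cases hs : PySem.Chars.isspace cs[j] = true
        · rw [aSkipNon_sp cs j h hs]
          rw [tokGen]
          simp only [dif_pos h, hs, if_pos]
          congr 1
          conv_rhs => rw [tokGen]
          simp [h, hs]
        · have hs' : PySem.Chars.isspace cs[j] = false := by simpa using hs
          rw [aSkipNon_step cs j h hs']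
          rw [tokGen]
          simp only [dif_pos h, hs', Bool.false_eq_true, ite_false]
          exact ih (j + 1) s (by omega) (by omega)
      · have hjn : j = cs.length := by omega
        rw [aSkipNon_stop cs j h, tokGen]
        simp only [dif_neg h]
        rw [tokGen]
        simp only [dif_neg h]
        rw [hjn]
  intro j s hj
  exact key (cs.length - j) j s le_rfl hj

-- head structure of the token list: first token starts at aSkipSp
lemma tokGen_head (cs : List Char) : ∀ j, j ≤ cs.length →
    tokGen cs none j =
      if _h : aSkipSp cs j < cs.length then
        ((aSkipSp cs j : Int), (aSkipNon cs (aSkipSp cs j) : Int)) ::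
          tokGen cs none (aSkipNon cs (aSkipSp cs j))
      else [] := by
  have key : ∀ k j, cs.length - j ≤ k → j ≤ cs.length →
      tokGen cs none j =
        if _h : aSkipSp cs j < cs.length then
          ((aSkipSp cs j : Int), (aSkipNon cs (aSkipSp cs j) : Int)) ::
            tokGen cs none (aSkipNon cs (aSkipSp cs j))
        else [] := by
    intro k
    induction k with
    | zero =>
      intro j hk hj
      have h : ¬ j < cs.length := by omega
      rw [aSkipSp_stop cs j h]
      rw [tokGen]
      simp [h]
    | succ k ih =>
      intro j hk hj
      by_cases h : j < cs.length
      · by_cases hs : PySem.Chars.isspace cs[j] = true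
        · rw [aSkipSp_step cs j h hs]
          rw [tokGen]
          simp only [dif_pos h, hs, if_pos]
          exact ih (j + 1) (by omega) (by omega)
        · have hs' : PySem.Chars.isspace cs[j] = false := by simpa using hs
          rw [aSkipSp_nsp cs j h hs']
          rw [tokGen]
          simp only [hs', Bool.false_eq_true, ite_false, dif_pos h]
          rw [tokGen_some cs (j + 1) j (by omega)]
          rw [aSkipNon_step cs j h hs']
      · rw [aSkipSp_stop cs j h]
        rw [tokGen]
        simp [h]
  intro j hj
  exact key (cs.length - j) j le_rfl hj

-- inside a token, A's scan adds nothing until the token's last character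
lemma spansA_token (cs : List Char) : ∀ i (h : i < cs.length),
    PySem.Chars.isspace cs[i] = false →
    spansA cs i =
      (if cs[aSkipNon cs i - 1]? = some '-' then
         (let f := aSkipSp cs (aSkipNon cs i);
          if f < cs.length then [((f : Int), (aSkipNon cs f : Int))] else [])
       else []) ++ spansA cs (aSkipNon cs i) := by
  have key : ∀ k i, cs.length - i ≤ k → ∀ (h : i < cs.length), PySem.Chars.isspace cs[i] = false →
      spansA cs i =
        (if cs[aSkipNon cs i - 1]? = some '-' then
           (let f := aSkipSp cs (aSkipNon cs i);
            if f < cs.length then [((f : Int), (aSkipNon cs f : Int))] else [])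
         else []) ++ spansA cs (aSkipNon cs i) := by
    intro k
    induction k with
    | zero => intro i hk h _; omega
    | succ k ih =>
      intro i hk h hns
      by_cases h2 : i + 1 < cs.length
      · by_cases hs2 : PySem.Chars.isspace cs[i + 1] = true
        · have he : aSkipNon cs i = i + 1 := by
            rw [aSkipNon_step cs i h hns, aSkipNon_sp cs (i + 1) h2 hs2]
          rw [he]
          rw [spansA]
          simp only [dif_pos h]
          congr 1
          have hget : cs[i]? = some cs[i] := List.getElem?_eq_getElem h
          have e1 : i + 1 - 1 = i := by omega
          rw [e1, hget]
          have hsp : spAt cs (i + 1) = true := by rw [spAt_lt cs (i + 1) h2]; exact hs2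
          by_cases hd : cs[i] = '-'
          · simp [hd, hsp]
          · simp [hd]
        · have hs2' : PySem.Chars.isspace cs[i + 1] = false := by simpa using hs2
          have he : aSkipNon cs i = aSkipNon cs (i + 1) := aSkipNon_step cs i h hns
          rw [he]
          rw [spansA]
          simp only [dif_pos h]
          have hsp : spAt cs (i + 1) = false := by rw [spAt_lt cs (i + 1) h2]; exact hs2'
          have hcond : ¬ (cs[i] = '-' ∧ (cs.length ≤ i + 1 ∨ spAt cs (i + 1) = true)) := by
            intro hc
            rcases hc.2 with h3 | h3
            · omega
            · rw [hsp] at h3; exact Bool.false_ne_true h3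
          rw [if_neg hcond, List.nil_append]
          exact ih (i + 1) (by omega) h2 hs2'
      · have he : aSkipNon cs i = i + 1 := by
          rw [aSkipNon_step cs i h hns, aSkipNon_stop cs (i + 1) h2]
        rw [he]
        rw [spansA]
        simp only [dif_pos h]
        congr 1
        have hget : cs[i]? = some cs[i] := List.getElem?_eq_getElem h
        have e1 : i + 1 - 1 = i := by omega
        rw [e1, hget]
        have hlen : cs.length ≤ i + 1 := by omega
        by_cases hd : cs[i] = '-'
        · simp [hd, hlen]
        · simp [hd]
  intro i h hns
  exact key (cs.length - i) i le_rfl h hns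

-- the central correspondence: A's span sequence = B's pair-span sequence over the tokens
lemma spansA_eq_pairSpans (cs : List Char) : ∀ j, j ≤ cs.length →
    spansA cs j = pairSpans cs (tokGen cs none j) := by
  have key : ∀ k j, cs.length - j ≤ k → j ≤ cs.length →
      spansA cs j = pairSpans cs (tokGen cs none j) := by
    intro k
    induction k with
    | zero =>
      intro j hk hj
      have h : ¬ j < cs.length := by omega
      rw [spansA]
      rw [tokGen]
      simp [h, pairSpans]
    | succ k ih =>
      intro j hk hj
      by_cases h : j < cs.length
      · by_cases hs : PySem.Chars.isspace cs[j] = true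
        · have hd : cs[j] ≠ '-' := by
            intro e; rw [e] at hs; exact absurd hs (by decide)
          rw [spansA]
          simp only [dif_pos h]
          rw [if_neg (by intro hc; exact hd hc.1), List.nil_append]
          have ht : tokGen cs none j = tokGen cs none (j + 1) := by
            conv_lhs => rw [tokGen]
            simp [h, hs]
          rw [ht]
          exact ih (j + 1) (by omega) (by omega)
        · have hs' : PySem.Chars.isspace cs[j] = false := by simpa using hs
          have hee : aSkipNon cs j = aSkipNon cs (j + 1) := aSkipNon_step cs j h hs'
          have hge : j + 1 ≤ aSkipNon cs j := by rw [hee]; exact aSkipNon_ge cs (j + 1)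
          have hle : aSkipNon cs j ≤ cs.length := aSkipNon_le cs j (by omega)
          have ht : tokGen cs none j =
              ((j : Int), (aSkipNon cs j : Int)) :: tokGen cs none (aSkipNon cs j) := by
            conv_lhs => rw [tokGen]
            simp only [dif_pos h, hs', Bool.false_eq_true, ite_false]
            rw [tokGen_some cs (j + 1) j (by omega), ← hee]
          rw [ht]
          rw [spansA_token cs j h hs']
          have hIH : spansA cs (aSkipNon cs j) = pairSpans cs (tokGen cs none (aSkipNon cs j)) :=
            ih (aSkipNon cs j) (by omega) hle
          have hcast : ((aSkipNon cs j : Int)) - 1 = ((aSkipNon cs j - 1 : Nat) : Int) := by omega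
          rw [tokGen_head cs (aSkipNon cs j) hle]
          by_cases hf : aSkipSp cs (aSkipNon cs j) < cs.length
          · rw [dif_pos hf]
            rw [pairSpans]
            rw [hcast, PySem.List.pyGet?_natCast]
            congr 1
            · split_ifs with hd
              · simp [hf]
              · rfl
            · rw [hIH, tokGen_head cs (aSkipNon cs j) hle, dif_pos hf]
          · rw [dif_neg hf]
            have hnil : pairSpans cs [((j : Int), (aSkipNon cs j : Int))] = [] := rfl
            rw [hnil]
            have h0 : spansA cs (aSkipNon cs j) = [] := by
              rw [hIH, tokGen_head cs (aSkipNon cs j) hle, dif_neg hf]; rfl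
            rw [h0]
            split_ifs with hd <;> simp [hf]
      · rw [spansA]
        rw [tokGen]
        simp [h, pairSpans]
  intro j hj
  exact key (cs.length - j) j le_rfl hj

-- B's first pass computes tokGen
lemma foldl_bStep_eq_tokGen (cs : List Char) : ∀ j (st : Option Nat) (acc : List (Int × Int)),
    finalize ((PySem.List.enumerate (cs.drop j) (j : Int)).foldl bStep (st.map (fun s => (s : Int)), acc)) (cs.length : Int)
      = acc ++ tokGen cs st j := by
  have key : ∀ k j (st : Option Nat) (acc : List (Int × Int)), cs.length - j ≤ k →
      finalize ((PySem.List.enumerate (cs.drop j) (j : Int)).foldl bStep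
          (st.map (fun s => (s : Int)), acc)) (cs.length : Int)
        = acc ++ tokGen cs st j := by
    intro k
    induction k with
    | zero =>
      intro j st acc hk
      have h : ¬ j < cs.length := by omega
      have hd : cs.drop j = [] := List.drop_eq_nil_of_le (by omega)
      rw [hd, PySem.List.enumerate_nil, List.foldl_nil]
      cases st with
      | some s => rw [tokGen]; simp only [dif_neg h]; simp [finalize]
      | none => rw [tokGen]; simp only [dif_neg h]; simp [finalize]
    | succ k ih =>
      intro j st acc hk
      by_cases h : j < cs.length
      · have hd : cs.drop j = cs[j] :: cs.drop (j + 1) := List.drop_eq_getElem_cons h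
        have hc : ((j : Int) + 1) = ((j + 1 : Nat) : Int) := by push_cast; ring
        rw [hd, PySem.List.enumerate_cons, List.foldl_cons, hc]
        by_cases hs : PySem.Chars.isspace cs[j] = true
        · cases st with
          | some s =>
            have hb : bStep ((some s).map (fun s => (s : Int)), acc) ((j : Int), cs[j]) =
                ((none : Option Nat).map (fun s => (s : Int)), acc ++ [((s : Int), (j : Int))]) := by
              simp [bStep, hs]
            rw [hb, ih (j + 1) none (acc ++ [((s : Int), (j : Int))]) (by omega)]
            have ht : tokGen cs (some s) j = ((s : Int), (j : Int)) :: tokGen cs none (j + 1) := by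
              conv_lhs => rw [tokGen]
              simp [h, hs]
            rw [ht]
            simp
          | none =>
            have hb : bStep ((none : Option Nat).map (fun s => (s : Int)), acc) ((j : Int), cs[j]) =
                ((none : Option Nat).map (fun s => (s : Int)), acc) := by
              simp [bStep, hs]
            rw [hb, ih (j + 1) none acc (by omega)]
            have ht : tokGen cs none j = tokGen cs none (j + 1) := by
              conv_lhs => rw [tokGen]
              simp [h, hs]
            rw [ht]
        · have hs' : PySem.Chars.isspace cs[j] = false := by simpa using hs
          cases st with
          | some s =>
            have hb : bStep ((some s).map (fun s => (s : Int)), acc) ((j : Int), cs[j]) =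
                ((some s).map (fun s => (s : Int)), acc) := by
              simp [bStep, hs']
            rw [hb, ih (j + 1) (some s) acc (by omega)]
            have ht : tokGen cs (some s) j = tokGen cs (some s) (j + 1) := by
              conv_lhs => rw [tokGen]
              simp [h, hs']
            rw [ht]
          | none =>
            have hb : bStep ((none : Option Nat).map (fun s => (s : Int)), acc) ((j : Int), cs[j]) =
                ((some j).map (fun s => (s : Int)), acc) := by
              simp [bStep, hs']
            rw [hb, ih (j + 1) (some j) acc (by omega)]
            have ht : tokGen cs none j = tokGen cs (some j) (j + 1) := by
              conv_lhs => rw [tokGen]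
              simp [h, hs']
            rw [ht]
      · have hd : cs.drop j = [] := List.drop_eq_nil_of_le (by omega)
        rw [hd, PySem.List.enumerate_nil, List.foldl_nil]
        cases st with
        | some s => rw [tokGen]; simp only [dif_neg h]; simp [finalize]
        | none => rw [tokGen]; simp only [dif_neg h]; simp [finalize]
  intro j st acc
  exact key (cs.length - j) j st acc le_rfl

-- B's second pass computes the fold of Set.add over pairSpans
lemma pairFold_eq_foldl (cs : List Char) : ∀ (toks : List (Int × Int)) acc,
    (toks.zip (toks.drop 1)).foldl
        (fun acc p =>
          if PySem.List.pyGet? cs (p.1.2 - 1) = some '-' then PySem.Set.add acc p.2 else acc)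
        acc
      = (pairSpans cs toks).foldl PySem.Set.add acc := by
  intro toks
  induction toks with
  | nil => intro acc; simp [pairSpans]
  | cons t1 rest ih =>
    intro acc
    cases rest with
    | nil => simp [pairSpans]
    | cons t2 r =>
      simp only [List.drop_succ_cons, List.drop_zero, List.zip_cons_cons, List.foldl_cons]
      have ih' := ih
      simp only [List.drop_succ_cons, List.drop_zero] at ih'
      rw [ih']
      rw [pairSpans]
      rw [List.foldl_append]
      congr 1
      split_ifs <;> simp

-- ===== VERDICT (by name: the statement is the Claim_ definition above) =====
theorem invalid_negative_spans_py_spec : Claim_equal_invalid_negative_spans_py := by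
  intro expr _
  unfold Spec_invalid_negative_spans_py invalid_negative_spans_py invalid_negative_spans_py_alt
  rw [aLoop_eq_foldl]
  rw [pairFold_eq_foldl]
  have htok : bTokens expr.toList = tokGen expr.toList none 0 := by
    have h0 := foldl_bStep_eq_tokGen expr.toList 0 none []
    simp only [List.drop_zero, Nat.cast_zero, List.nil_append] at h0
    exact h0
  rw [htok, spansA_eq_pairSpans expr.toList 0 (by omega)]
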